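-- pv_equiv track=rewrite | github.com/TOMfk/discover | project1/rili.py | get_total_num_of_days
-- ===== SOURCE A (Python) =====
-- def is_leap_year(year):
--     """
--     判断闰年
--     :param year:
--     :return:
--     """
--     return year % 4 == 0 and year % 100 != 0 or year % 400 == 0
--
-- def get_num_of_days_in_month(year, month):
--     """
--     获得每月的天数
--     :param year:
--     :param month:
--     :return:
--     """
--     if month in (1, 3, 5, 7, 8, 10, 12):
--         return 31
--     elif month in (4, 6, 9, 11):
--         return 30
--     elif is_leap_year(year):
--         return 29
--     return 28
--
-- def get_total_num_of_days(year, month):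
--     """
--     获得1800年输入年月总天数
--     :param year:
--     :param month:
--     :return:
--     """
--     days = 0
--     for y in range(1800, year):
--         if is_leap_year(y):
--             days += 366
--         else:
--             days += 365
--
--     for m in range(1, month):
--         days += get_num_of_days_in_month(year, m)
--
--     return days
-- ===== SOURCE B (Python) =====
-- def get_total_num_of_days(year, month):
--     leap = year % 4 == 0 and year % 100 != 0 or year % 400 == 0
--     month_days = (31, 29 if leap else 28, 31, 30, 31, 30, 31, 31, 30, 31, 30, 31)
--     days = sum(month_days[m - 1] for m in range(1, month))
--     if year > 1800:
--         # leap years in [1800, year): closed-form Gregorian count; 436 = leap years below 1800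
--         days += 365 * (year - 1800) + (year - 1) // 4 - (year - 1) // 100 + (year - 1) // 400 - 436
--     return days
-- ===== Notes on version B (the rewrite author's own statement) =====
-- stated objective: faster
-- what changed: Replaces A's year-by-year loop summing 365/366 with a closed-form floor-division leap-year count, and the month loop with a sum over a fixed 12-entry month-length table; Pre_ excludes months above 13, where A's fall-through accidentally counts February-length days for nonexistent months while B's table indexing raises IndexError.
-- outside the precondition, e.g. on get_total_num_of_days(2000, 14): A returns 73443, B raises IndexError
import Mathlib
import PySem

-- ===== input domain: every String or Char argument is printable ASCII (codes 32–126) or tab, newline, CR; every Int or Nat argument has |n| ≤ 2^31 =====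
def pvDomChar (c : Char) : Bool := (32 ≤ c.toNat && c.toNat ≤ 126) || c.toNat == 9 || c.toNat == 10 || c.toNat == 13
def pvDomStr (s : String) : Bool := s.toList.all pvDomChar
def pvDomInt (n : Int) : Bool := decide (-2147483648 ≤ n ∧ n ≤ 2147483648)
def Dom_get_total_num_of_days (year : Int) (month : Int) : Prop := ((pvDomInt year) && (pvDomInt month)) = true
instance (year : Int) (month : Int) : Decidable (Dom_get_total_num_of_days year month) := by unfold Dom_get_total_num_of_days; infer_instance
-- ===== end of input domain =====

-- B replaces A's year-by-year loop with a closed-form floor-division leap count and sums a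
-- fixed month-length table (objective: a constant-size computation); equality proved on Pre_.

-- ===== PORT A =====
def is_leap_year (year : Int) : Bool :=
  (PySem.Int.mod year 4 == 0 && PySem.Int.mod year 100 != 0) || PySem.Int.mod year 400 == 0

def get_num_of_days_in_month (year : Int) (month : Int) : Int :=
  if month = 1 ∨ month = 3 ∨ month = 5 ∨ month = 7 ∨ month = 8 ∨ month = 10 ∨ month = 12 then 31
  else if month = 4 ∨ month = 6 ∨ month = 9 ∨ month = 11 then 30
  else if is_leap_year year then 29
  else 28

def get_total_num_of_days (year : Int) (month : Int) : Int :=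
  let days : Int :=
    (PySem.List.pyRange 1800 year 1).foldl
      (fun days y => if is_leap_year y then days + 366 else days + 365) 0
  (PySem.List.pyRange 1 month 1).foldl
    (fun days m => days + get_num_of_days_in_month year m) days

-- ===== PORT B =====
def get_total_num_of_days_alt (year : Int) (month : Int) : Int :=
  let leap : Bool := (PySem.Int.mod year 4 == 0 && PySem.Int.mod year 100 != 0) || PySem.Int.mod year 400 == 0
  let month_days : List Int := [31, if leap then 29 else 28, 31, 30, 31, 30, 31, 31, 30, 31, 30, 31]
  -- month_days[m-1]: exact on Pre_ (month ≤ 13 keeps every index in range; Python raises beyond)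
  let days : Int :=
    ((PySem.List.pyRange 1 month 1).map (fun m => PySem.List.pyGetD month_days (m - 1) 0)).sum
  if year > 1800 then
    days + (365 * (year - 1800) + PySem.Int.floordiv (year - 1) 4
      - PySem.Int.floordiv (year - 1) 100 + PySem.Int.floordiv (year - 1) 400 - 436)
  else days

-- ===== PRECONDITION & SPEC =====
-- Pre_ excludes months above 13, on which A's accidental fall-through in get_num_of_days_in_month
-- returns February-length days for nonexistent months while B's table indexing raises IndexError.
def Pre_get_total_num_of_days (year : Int) (month : Int) : Prop := month ≤ 13
instance (year : Int) (month : Int) : Decidable (Pre_get_total_num_of_days year month) := by unfold Pre_get_total_num_of_days; infer_instance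

def pvWitness_get_total_num_of_days : Int × Int := (1850, 7)

def Spec_get_total_num_of_days (year : Int) (month : Int) (out : Int) : Prop := out = get_total_num_of_days_alt year month
instance (year : Int) (month : Int) (out : Int) : Decidable (Spec_get_total_num_of_days year month out) := by unfold Spec_get_total_num_of_days; infer_instance

-- ===== CLAIM (what is proved, stated in full; the proofs are below) =====
def Claim_equal_get_total_num_of_days : Prop := ∀ (year : Int) (month : Int), Dom_get_total_num_of_days year month → Pre_get_total_num_of_days year month → Spec_get_total_num_of_days year month (get_total_num_of_days year month)

-- ===== LEMMAS AND PROOFS =====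

-- the closed-form leap count of B's year term, as a proof-side abbreviation
def leaps_below (y : Int) : Int :=
  PySem.Int.floordiv (y - 1) 4 - PySem.Int.floordiv (y - 1) 100 + PySem.Int.floordiv (y - 1) 400

-- one Gregorian step of the closed-form leap count
theorem leaps_below_succ (y : Int) :
    leaps_below (y + 1) = leaps_below y + (if is_leap_year y then 1 else 0) := by
  simp only [leaps_below, is_leap_year, add_sub_cancel_right,
    PySem.Int.floordiv_eq_ediv_of_pos (show (0:Int) < 4 by norm_num),
    PySem.Int.floordiv_eq_ediv_of_pos (show (0:Int) < 100 by norm_num),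
    PySem.Int.floordiv_eq_ediv_of_pos (show (0:Int) < 400 by norm_num),
    PySem.Int.mod_eq_emod_of_pos (show (0:Int) < 4 by norm_num),
    PySem.Int.mod_eq_emod_of_pos (show (0:Int) < 100 by norm_num),
    PySem.Int.mod_eq_emod_of_pos (show (0:Int) < 400 by norm_num),
    Bool.or_eq_true, Bool.and_eq_true, beq_iff_eq, bne_iff_ne, ne_eq]
  split_ifs with h
  · omega
  · omega

-- A's year loop, summed in closed form (year ≥ 1800 written as 1800 + n)
theorem year_loop_closed (n : Nat) :
    (PySem.List.pyRange 1800 (1800 + (n : Int)) 1).foldl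
      (fun days y => if is_leap_year y then days + 366 else days + 365) 0
    = 365 * (n : Int) + leaps_below (1800 + (n : Int)) - leaps_below 1800 := by
  induction n with
  | zero => rw [show (1800:Int) + ((0:Nat):Int) = 1800 by norm_num, PySem.List.pyRange_one_eq_nil le_rfl]; simp
  | succ k ih =>
    have h : (1800 : Int) + ((k + 1 : Nat) : Int) = (1800 + (k : Int)) + 1 := by push_cast; ring
    rw [h, PySem.List.pyRange_one_succ_right (by omega), List.foldl_append, ih,
      leaps_below_succ]
    simp only [List.foldl_cons, List.foldl_nil]
    push_cast
    split_ifs <;> ring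

-- A's year loop equals B's guarded closed form for every year
theorem year_part_eq (year : Int) :
    (PySem.List.pyRange 1800 year 1).foldl
      (fun days y => if is_leap_year y then days + 366 else days + 365) 0
    = if year > 1800 then 365 * (year - 1800) + leaps_below year - 436 else 0 := by
  rcases (by omega : year ≤ 1800 ∨ 1800 < year) with h | h
  · rw [PySem.List.pyRange_one_eq_nil h, if_neg (by omega)]
    simp
  · have hy : year = 1800 + ((year - 1800).toNat : Int) := by omega
    rw [if_pos h]
    conv_lhs => rw [hy]
    rw [year_loop_closed, ← hy]
    have h436 : leaps_below 1800 = 436 := by decide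
    rw [h436]
    omega

-- per-month agreement on real months 1..12
theorem month_entry_eq (year m : Int) (h1 : 1 ≤ m) (h2 : m < 13) :
    get_num_of_days_in_month year m
      = PySem.List.pyGetD
          [31, if is_leap_year year then 29 else 28, 31, 30, 31, 30, 31, 31, 30, 31, 30, 31]
          (m - 1) 0 := by
  cases hb : is_leap_year year <;>
    · interval_cases m <;> simp [get_num_of_days_in_month, hb] <;> rfl

-- ===== VERDICT (by name: the statement is the Claim_ definition above) =====
theorem get_total_num_of_days_spec : Claim_equal_get_total_num_of_days := by
  intro year month _ hpre
  unfold Spec_get_total_num_of_days get_total_num_of_days get_total_num_of_days_alt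
  simp only []
  rw [year_part_eq year,
    show ((PySem.Int.mod year 4 == 0 && PySem.Int.mod year 100 != 0) || PySem.Int.mod year 400 == 0) = is_leap_year year from rfl]
  rw [PySem.List.foldl_add]
  have h1 : List.map (fun m => get_num_of_days_in_month year m) (PySem.List.pyRange 1 month)
      = List.map (fun m => PySem.List.pyGetD [31, if is_leap_year year then 29 else 28, 31, 30, 31, 30, 31, 31, 30, 31, 30, 31] (m - 1) 0) (PySem.List.pyRange 1 month) := by
    apply List.map_congr_left
    intro m hmem
    rw [PySem.List.mem_pyRange_one] at hmem
    exact month_entry_eq year m hmem.1 (by unfold Pre_get_total_num_of_days at hpre; omega)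
  rw [h1]
  simp only [leaps_below]
  split_ifs <;> ring
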